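-- pv_equiv track=rewrite | github.com/paiml/depyler | examples/test_performance_warnings.py | large_sum_in_loop
-- ===== SOURCE A (Python) =====
-- def large_sum_in_loop(n: int) -> int:
--     """Creating sums in loops."""
--     results: int = 0
--     i: int = 0
--     while i < n:
--         temp_sum: int = 0
--         j: int = 0
--         while j < 100:
--             temp_sum = temp_sum + j
--             j = j + 1
--         results = results + temp_sum
--         i = i + 1
--     return results
-- ===== SOURCE B (Python) =====
-- def large_sum_in_loop(n: int) -> int:
--     """Creating sums in loops."""
--     # Each outer iteration adds sum(range(100)) = 4950; closed form.
--     return max(n, 0) * 4950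
-- ===== Notes on version B (the rewrite author's own statement) =====
-- stated objective: faster
-- what changed: Replaced the nested while loops by the closed form max(n,0)*4950, since each outer iteration adds the constant sum 0+1+...+99 = 4950.
import Mathlib
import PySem

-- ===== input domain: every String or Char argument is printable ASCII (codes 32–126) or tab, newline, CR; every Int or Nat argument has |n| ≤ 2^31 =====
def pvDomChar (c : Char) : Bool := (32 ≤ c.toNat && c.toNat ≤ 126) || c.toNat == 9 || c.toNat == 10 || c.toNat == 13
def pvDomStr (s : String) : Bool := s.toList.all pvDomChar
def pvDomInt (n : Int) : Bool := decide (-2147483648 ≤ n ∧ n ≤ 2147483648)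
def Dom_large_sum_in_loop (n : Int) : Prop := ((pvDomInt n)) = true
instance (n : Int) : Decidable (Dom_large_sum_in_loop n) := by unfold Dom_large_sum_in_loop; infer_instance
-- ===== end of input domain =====

-- B replaces A's nested while loops by the closed form max(n,0)*4950 (each outer pass adds 4950).

-- ===== PORT A =====
-- inner 'while j < 100' loop: temp_sum accumulates j
def pvInnerA (temp_sum j : Int) : Int :=
  if h : j < 100 then pvInnerA (temp_sum + j) (j + 1) else temp_sum
termination_by (100 - j).toNat
decreasing_by omega

-- outer 'while i < n' loop
def pvOuterA (n results i : Int) : Int :=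
  if h : i < n then pvOuterA n (results + pvInnerA 0 0) (i + 1) else results
termination_by (n - i).toNat
decreasing_by omega

def large_sum_in_loop (n : Int) : Int := pvOuterA n 0 0

-- ===== PORT B =====
def large_sum_in_loop_alt (n : Int) : Int := max n 0 * 4950

-- ===== PRECONDITION & SPEC =====
def Spec_large_sum_in_loop (n : Int) (out : Int) : Prop := out = large_sum_in_loop_alt n
instance (n : Int) (out : Int) : Decidable (Spec_large_sum_in_loop n out) := by unfold Spec_large_sum_in_loop; infer_instance

-- ===== CLAIM (what is proved, stated in full; the proofs are below) =====
def Claim_equal_large_sum_in_loop : Prop := ∀ (n : Int), Dom_large_sum_in_loop n → Spec_large_sum_in_loop n (large_sum_in_loop n)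

-- ===== LEMMAS AND PROOFS =====
theorem pvInnerA_eq (k : Nat) : ∀ (temp j : Int), (100 - j).toNat = k →
    pvInnerA temp j = temp + ∑ m ∈ Finset.range k, (j + (m : Int)) := by
  induction k with
  | zero =>
    intro temp j hk
    rw [pvInnerA]
    have : ¬ j < 100 := by omega
    simp [this]
  | succ m ih =>
    intro temp j hk
    rw [pvInnerA]
    have h : j < 100 := by omega
    simp only [h, dif_pos]
    rw [ih (temp + j) (j + 1) (by omega), Finset.sum_range_succ']
    push_cast
    ring_nf

theorem pvInnerA_val : pvInnerA 0 0 = 4950 := by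
  rw [pvInnerA_eq 100 0 0 (by decide)]
  have h := Finset.sum_range_id_mul_two 100
  have : (∑ m ∈ Finset.range 100, (0 + (m : Int))) = ((∑ m ∈ Finset.range 100, m : Nat) : Int) := by
    push_cast; ring_nf
  omega

theorem pvOuterA_eq (k : Nat) : ∀ (n results i : Int), (n - i).toNat = k →
    pvOuterA n results i = results + (k : Int) * 4950 := by
  induction k with
  | zero =>
    intro n results i hk
    rw [pvOuterA]
    have : ¬ i < n := by omega
    simp [this]
  | succ m ih =>
    intro n results i hk
    rw [pvOuterA]
    have h : i < n := by omega
    simp only [h, dif_pos]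
    rw [ih n _ (i + 1) (by omega), pvInnerA_val]
    push_cast
    ring

-- ===== VERDICT (by name: the statement is the Claim_ definition above) =====
theorem large_sum_in_loop_spec : Claim_equal_large_sum_in_loop := by
  intro n _
  unfold Spec_large_sum_in_loop large_sum_in_loop large_sum_in_loop_alt
  rw [pvOuterA_eq (n - 0).toNat n 0 0 rfl]
  omega
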